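-- pv_equiv track=rewrite | github.com/VanadiumZ/IRsystem_RUCeek | query.py | _compute_unordered_window_tf
-- ===== SOURCE A (Python) =====
-- def _compute_unordered_window_tf(positions1, positions2, window_size=8):
--     """
--     计算无序窗口词频 (Unordered Window TF)
--     找到最小跨度 <= window_size 的片段个数
--
--     Args:
--         positions1: 第一个词的位置列表
--         positions2: 第二个词的位置列表
--         window_size: 窗口大小，默认为8
--
--     Returns:
--         int: 无序窗口匹配次数
--     """
--     if not positions1 or not positions2:
--         return 0
--
--     # 合并并排序所有位置，同时记录来源
--     all_positions = []
--     for pos in positions1: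
--         all_positions.append((pos, 1))  # 标记为第一个词
--     for pos in positions2:
--         all_positions.append((pos, 2))  # 标记为第二个词
--
--     all_positions.sort()
--
--     count = 0
--     i = 0
--
--     while i < len(all_positions):
--         # 寻找包含两个词的最小窗口
--         seen_words = set()
--         j = i
--
--         while j < len(all_positions) and len(seen_words) < 2:
--             seen_words.add(all_positions[j][1])
--             j += 1
--
--         if len(seen_words) == 2:  # 找到包含两个词的窗口
--             span = all_positions[j-1][0] - all_positions[i][0]
--             if span <= window_size:
--                 count += 1
--
--         i += 1
--
--     return count
-- ===== SOURCE B (Python) =====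
-- def _compute_unordered_window_tf(positions1, positions2, window_size=8):
--     """One backward pass over the sorted merged positions: for each element,
--     the nearest following differently-labelled position is chained from the
--     right, removing A's inner forward scan."""
--     if not positions1 or not positions2:
--         return 0
--     events = [(p, 1) for p in positions1] + [(p, 2) for p in positions2]
--     events.sort()
--     count = 0
--     prev = None  # (pos, label, nearest following pos with a different label or None)
--     for p, t in reversed(events):
--         if prev is None:
--             nd = None
--         elif prev[1] != t:
--             nd = prev[0]
--         else:
--             nd = prev[2]
--         if nd is not None and nd - p <= window_size:
--             count += 1
--         prev = (p, t, nd)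
--     return count
-- ===== Notes on version B (the rewrite author's own statement) =====
-- stated objective: faster
-- what changed: A re-scans forward from every index to find the first differently-labelled position (quadratic inner loop); B sorts once and then, in a single backward pass, chains for each element the nearest following position with the other label, so the inner scan disappears.
import Mathlib
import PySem

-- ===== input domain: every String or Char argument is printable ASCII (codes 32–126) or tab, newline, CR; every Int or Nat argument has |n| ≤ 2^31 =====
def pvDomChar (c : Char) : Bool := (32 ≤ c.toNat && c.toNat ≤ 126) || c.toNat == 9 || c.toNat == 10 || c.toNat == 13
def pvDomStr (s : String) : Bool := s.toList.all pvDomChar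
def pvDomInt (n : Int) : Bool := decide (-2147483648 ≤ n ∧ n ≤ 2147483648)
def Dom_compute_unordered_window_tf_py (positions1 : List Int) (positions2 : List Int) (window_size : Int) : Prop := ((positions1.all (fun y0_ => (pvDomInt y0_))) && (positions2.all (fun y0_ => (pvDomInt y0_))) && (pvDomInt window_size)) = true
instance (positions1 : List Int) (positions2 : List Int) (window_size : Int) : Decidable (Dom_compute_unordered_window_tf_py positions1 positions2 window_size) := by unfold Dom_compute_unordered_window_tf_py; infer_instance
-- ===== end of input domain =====

-- B replaces A's quadratic inner forward scan by a single backward pass that chains,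
-- for each sorted position, the nearest following differently-labelled position.

-- ===== PORT A =====
-- inner 'while j < len(all_positions) and len(seen_words) < 2' loop of A,
-- structural recursion on the remaining-step fuel (always called with fuel = length - j,
-- so the fuel never runs out before the while-condition fails);
-- all_positions[j] is ported as getD under the guard j < length, where it is exact
def pvAInner (L : List (Int × Int)) : Nat → PySem.Set Int → Nat → PySem.Set Int × Nat
  | 0, seen, j => (seen, j)
  | fuel + 1, seen, j =>
    if j < L.length ∧ seen.length < 2 then
      pvAInner L fuel (PySem.Set.add seen (L.getD j (0, 0)).2) (j + 1)
    else (seen, j)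

-- outer 'while i < len(all_positions)' loop of A, same fuel pattern
def pvAOuter (L : List (Int × Int)) (w : Int) : Nat → Nat → Int → Int
  | 0, _, count => count
  | fuel + 1, i, count =>
    if i < L.length then
      let r := pvAInner L (L.length - i) PySem.Set.empty i
      let count' :=
        if r.1.length = 2 then
          if (L.getD (r.2 - 1) (0, 0)).1 - (L.getD i (0, 0)).1 ≤ w then count + 1 else count
        else count
      pvAOuter L w fuel (i + 1) count'
    else count

def compute_unordered_window_tf_py (positions1 : List Int) (positions2 : List Int) (window_size : Int) : Int :=
  if positions1 = [] ∨ positions2 = [] then 0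
  else
    let allPositions := positions1.map (fun p => (p, (1 : Int))) ++ positions2.map (fun p => (p, (2 : Int)))
    -- all_positions.sort() sorts the (pos, label) tuples lexicographically; as every
    -- label-1 pair precedes every label-2 pair in the unsorted concatenation, the stable
    -- sort by position alone produces exactly that lexicographic order (exact here)
    let L := PySem.List.sorted allPositions (fun e => e.1) false
    pvAOuter L window_size L.length 0 0

-- ===== PORT B =====
-- 'for p, t in reversed(events)' with the chained prev = (pos, label, nd) triple:
-- structural right-to-left recursion returning (count, prev)
def pvBGo (w : Int) : List (Int × Int) → Int × Option (Int × Int × Option Int)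
  | [] => (0, none)
  | (p, t) :: rest =>
    let r := pvBGo w rest
    let nd : Option Int :=
      match r.2 with
      | none => none
      | some (q, t', nd') => if t' ≠ t then some q else nd'
    let c : Int :=
      match nd with
      | some q => if q - p ≤ w then r.1 + 1 else r.1
      | none => r.1
    (c, some (p, t, nd))

def compute_unordered_window_tf_py_alt (positions1 : List Int) (positions2 : List Int) (window_size : Int) : Int :=
  if positions1 = [] ∨ positions2 = [] then 0
  else
    let events := positions1.map (fun p => (p, (1 : Int))) ++ positions2.map (fun p => (p, (2 : Int)))
    -- events.sort(): same lexicographic tuple sort as in A (stable by position, exact here)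
    let L := PySem.List.sorted events (fun e => e.1) false
    (pvBGo window_size L).1

-- ===== PRECONDITION & SPEC =====
def Spec_compute_unordered_window_tf_py (positions1 : List Int) (positions2 : List Int) (window_size : Int) (out : Int) : Prop := out = compute_unordered_window_tf_py_alt positions1 positions2 window_size
instance (positions1 : List Int) (positions2 : List Int) (window_size : Int) (out : Int) : Decidable (Spec_compute_unordered_window_tf_py positions1 positions2 window_size out) := by unfold Spec_compute_unordered_window_tf_py; infer_instance

-- ===== CLAIM (what is proved, stated in full; the proofs are below) =====
def Claim_equal_compute_unordered_window_tf_py : Prop := ∀ (positions1 : List Int) (positions2 : List Int) (window_size : Int), Dom_compute_unordered_window_tf_py positions1 positions2 window_size → Spec_compute_unordered_window_tf_py positions1 positions2 window_size (compute_unordered_window_tf_py positions1 positions2 window_size)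

-- ===== LEMMAS AND PROOFS =====

-- position of the first element of the list whose label differs from t
def pvFdp (t : Int) : List (Int × Int) → Option Int
  | [] => none
  | (q, t') :: rest => if t' = t then pvFdp t rest else some q

-- per-suffix count of heads whose nearest differing follower is within w
def pvSpecCount (w : Int) : List (Int × Int) → Int
  | [] => 0
  | (p, t) :: rest =>
    pvSpecCount w rest +
      (match pvFdp t rest with
       | some q => if q - p ≤ w then 1 else 0
       | none => 0)

lemma pvBGo_cons_snd (w p t : Int) (rest : List (Int × Int)) :
    (pvBGo w ((p, t) :: rest)).2 = some (p, t,
      match (pvBGo w rest).2 with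
      | none => none
      | some (q, t', nd') => if t' ≠ t then some q else nd') := rfl

lemma pvBGo_cons_fst (w p t : Int) (rest : List (Int × Int)) :
    (pvBGo w ((p, t) :: rest)).1 =
      match (match (pvBGo w rest).2 with
             | none => none
             | some (q, t', nd') => if t' ≠ t then some q else nd') with
      | some q => if q - p ≤ w then (pvBGo w rest).1 + 1 else (pvBGo w rest).1
      | none => (pvBGo w rest).1 := rfl

lemma pvBGo_snd (w : Int) (rest : List (Int × Int)) : ∀ (p t : Int),
    (pvBGo w ((p, t) :: rest)).2 = some (p, t, pvFdp t rest) := by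
  induction rest with
  | nil => intro p t; simp [pvBGo, pvFdp]
  | cons hd tl ih =>
    obtain ⟨q, t'⟩ := hd
    intro p t
    rw [pvBGo_cons_snd, ih q t']
    by_cases h : t' = t
    · subst h; simp [pvFdp]
    · simp [pvFdp, h]

lemma pvBGo_fst (w : Int) : ∀ (L : List (Int × Int)),
    (pvBGo w L).1 = pvSpecCount w L := by
  intro L
  induction L with
  | nil => simp [pvBGo, pvSpecCount]
  | cons hd rest ih =>
    obtain ⟨p, t⟩ := hd
    rw [pvBGo_cons_fst, ih]
    cases rest with
    | nil => simp [pvBGo, pvSpecCount, pvFdp]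
    | cons hd' tl =>
      obtain ⟨q, t'⟩ := hd'
      rw [pvBGo_snd w tl q t']
      by_cases h : t' = t
      · subst h
        cases hfd : pvFdp t' tl <;> (simp [pvSpecCount, pvFdp, hfd]; try split_ifs <;> ring)
      · simp [pvSpecCount, pvFdp, h]
        split_ifs <;> ring

lemma pvAInner_full (L : List (Int × Int)) (a b : Int) (fuel j : Nat) :
    pvAInner L fuel [a, b] j = ([a, b], j) := by
  cases fuel <;> simp [pvAInner]

lemma pvAInner_none (L : List (Int × Int)) (t : Int) : ∀ fuel j, L.length ≤ j + fuel →
    j ≤ L.length → pvFdp t (L.drop j) = none →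
    pvAInner L fuel [t] j = ([t], L.length) := by
  intro fuel
  induction fuel with
  | zero =>
    intro j hfu hj _
    have hje : j = L.length := by omega
    rw [pvAInner, hje]
  | succ n ih =>
    intro j hfu hj hf
    by_cases hjlt : j < L.length
    · have hdrop : L.drop j = L[j] :: L.drop (j + 1) := List.drop_eq_getElem_cons hjlt
      rw [hdrop, pvFdp] at hf
      have ht : L[j].2 = t := by
        by_contra hne
        simp [hne] at hf
      have hf' : pvFdp t (L.drop (j + 1)) = none := by
        simpa [ht] using hf
      rw [pvAInner, if_pos ⟨hjlt, by simp⟩]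
      have hget : L.getD j (0, 0) = L[j] := List.getD_eq_getElem L (0,0) hjlt
      have hadd : PySem.Set.add [t] (L.getD j (0, 0)).2 = [t] := by
        rw [hget, ht]; simp [PySem.Set.add, PySem.Set.contains]
      rw [hadd]
      exact ih (j + 1) (by omega) (by omega) hf'
    · have hje : j = L.length := by omega
      rw [pvAInner, if_neg (by omega), hje]

lemma pvAInner_some (L : List (Int × Int)) (t q : Int) : ∀ fuel j, L.length ≤ j + fuel →
    j ≤ L.length → pvFdp t (L.drop j) = some q →
    ∃ j' t', pvAInner L fuel [t] j = ([t, t'], j' + 1) ∧ j' < L.length ∧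
      L.getD j' (0, 0) = (q, t') := by
  intro fuel
  induction fuel with
  | zero =>
    intro j hfu hj hf
    have hje : j = L.length := by omega
    rw [hje, List.drop_length, pvFdp] at hf
    exact absurd hf (by simp)
  | succ n ih =>
    intro j hfu hj hf
    have hjlt : j < L.length := by
      by_contra h
      have hje : j = L.length := by omega
      rw [hje, List.drop_length, pvFdp] at hf
      exact absurd hf (by simp)
    have hdrop : L.drop j = L[j] :: L.drop (j + 1) := List.drop_eq_getElem_cons hjlt
    rw [hdrop, pvFdp] at hf
    have hget : L.getD j (0, 0) = L[j] := List.getD_eq_getElem L (0,0) hjlt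
    by_cases ht : L[j].2 = t
    · have hf' : pvFdp t (L.drop (j + 1)) = some q := by simpa [ht] using hf
      rw [pvAInner, if_pos ⟨hjlt, by simp⟩]
      have hadd : PySem.Set.add [t] (L.getD j (0, 0)).2 = [t] := by
        rw [hget, ht]; simp [PySem.Set.add, PySem.Set.contains]
      rw [hadd]
      exact ih (j + 1) (by omega) (by omega) hf'
    · have hq : L[j].1 = q := by
        simp [ht] at hf; exact hf
      rw [pvAInner, if_pos ⟨hjlt, by simp⟩]
      have hadd : PySem.Set.add [t] (L.getD j (0, 0)).2 = [t, L[j].2] := by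
        rw [hget]; simp [PySem.Set.add, PySem.Set.contains, ht]
      rw [hadd, pvAInner_full]
      exact ⟨j, L[j].2, rfl, hjlt, by rw [hget, ← hq]⟩

lemma pvAOuter_eq (L : List (Int × Int)) (w : Int) : ∀ fuel j (c : Int),
    L.length ≤ j + fuel →
    pvAOuter L w fuel j c = c + pvSpecCount w (L.drop j) := by
  intro fuel
  induction fuel with
  | zero =>
    intro j c hfu
    rw [pvAOuter, List.drop_eq_nil_of_le (by omega), pvSpecCount]
    ring
  | succ n ih =>
    intro j c hfu
    by_cases hjlt : j < L.length
    · have hdrop : L.drop j = L[j] :: L.drop (j + 1) := List.drop_eq_getElem_cons hjlt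
      have hget : L.getD j (0, 0) = L[j] := List.getD_eq_getElem L (0,0) hjlt
      have hfuel : L.length - j = (L.length - (j + 1)) + 1 := by omega
      have hstart : pvAInner L (L.length - j) PySem.Set.empty j
          = pvAInner L (L.length - (j + 1)) [L[j].2] (j + 1) := by
        rw [hfuel, pvAInner, if_pos ⟨hjlt, by simp [PySem.Set.empty]⟩, hget]
        rfl
      rw [pvAOuter, if_pos hjlt, hstart, hdrop, pvSpecCount]
      cases hfd : pvFdp (L[j].2) (L.drop (j + 1)) with
      | none =>
        rw [pvAInner_none L L[j].2 (L.length - (j + 1)) (j + 1) (by omega) (by omega) hfd]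
        simp only [List.length_cons, List.length_nil]
        rw [if_neg (by omega), ih (j + 1) c (by omega)]
        ring
      | some qq =>
        obtain ⟨j', t', heq, hj'lt, hgetj'⟩ :=
          pvAInner_some L L[j].2 qq (L.length - (j + 1)) (j + 1) (by omega) (by omega) hfd
        rw [heq]
        simp only [List.length_cons, List.length_nil, Nat.add_sub_cancel, hgetj', hget, if_true]
        by_cases hle : qq - L[j].1 ≤ w
        · rw [if_pos hle, ih (j + 1) (c + 1) (by omega)]
          simp [hle]; ring
        · rw [if_neg hle, ih (j + 1) c (by omega)]
          simp [hle]
    · rw [pvAOuter, if_neg hjlt, List.drop_eq_nil_of_le (by omega), pvSpecCount]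
      ring

-- ===== VERDICT (by name: the statement is the Claim_ definition above) =====
theorem compute_unordered_window_tf_py_spec : Claim_equal_compute_unordered_window_tf_py := by
  intro positions1 positions2 window_size _
  unfold Spec_compute_unordered_window_tf_py
  unfold compute_unordered_window_tf_py compute_unordered_window_tf_py_alt
  by_cases hemp : positions1 = [] ∨ positions2 = []
  · simp [hemp]
  · simp only [if_neg hemp]
    rw [pvBGo_fst]
    rw [pvAOuter_eq _ window_size _ 0 0 (by omega)]
    simp
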